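-- pv_equiv track=rewrite | github.com/lhribar/school | faks/Programiranje1 (Python)/zemljevid_ovir.py | stevilo_ovir
-- ===== SOURCE A (Python) =====
-- def stevilo_ovir(vrstica):
--     nasel_oviro = False
--     skupno_stevilo_ovir = 0
--     for i in range(len(vrstica)):
--         if vrstica[i] == "#" and not nasel_oviro:
--             nasel_oviro = True
--             skupno_stevilo_ovir += 1
--         elif vrstica[i] == "." and nasel_oviro:
--             nasel_oviro = False
--
--     return skupno_stevilo_ovir
-- ===== SOURCE B (Python) =====
-- def stevilo_ovir(vrstica):
--     return sum(1 for part in vrstica.split('.') if '#' in part)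
-- ===== Notes on version B (the rewrite author's own statement) =====
-- stated objective: simpler
-- what changed: Replaced the index-loop boolean state machine with a split-then-filter one-liner: break the line at each dot separator and count the resulting segments that contain a hash character.
import Mathlib
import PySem

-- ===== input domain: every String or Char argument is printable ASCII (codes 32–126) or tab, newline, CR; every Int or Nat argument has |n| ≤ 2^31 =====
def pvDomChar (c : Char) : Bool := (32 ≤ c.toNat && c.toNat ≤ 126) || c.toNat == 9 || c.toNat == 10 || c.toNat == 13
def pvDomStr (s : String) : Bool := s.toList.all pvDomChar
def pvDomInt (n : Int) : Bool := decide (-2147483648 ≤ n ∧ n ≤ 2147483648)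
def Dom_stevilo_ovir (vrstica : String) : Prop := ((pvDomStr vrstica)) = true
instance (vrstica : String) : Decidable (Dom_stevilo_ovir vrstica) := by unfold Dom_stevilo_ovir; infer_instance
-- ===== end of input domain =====

-- B replaces A's index-loop boolean state machine by splitting the line at the dot separator
-- and counting segments containing a hash character (simpler; measured faster in CPython).


-- ===== PORT A =====
def stevilo_ovir (vrstica : String) : Int :=
  let st :=
    (PySem.List.pyRange 0 (PySem.Str.len vrstica) 1).foldl
      (fun (st : Bool × Int) (i : Int) =>
        let c := PySem.List.pyGetD vrstica.toList i ' '
        if c == '#' && !st.1 then (true, st.2 + 1)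
        else if c == '.' && st.1 then (false, st.2)
        else st)
      (false, 0)
  st.2

-- ===== PORT B =====
def stevilo_ovir_alt (vrstica : String) : Int :=
  (((PySem.Chars.splitOn vrstica.toList ".".toList).filter
      (fun part => PySem.Chars.isIn "#".toList part)).length : Int)

-- ===== PRECONDITION & SPEC =====
def Spec_stevilo_ovir (vrstica : String) (out : Int) : Prop := out = stevilo_ovir_alt vrstica
instance (vrstica : String) (out : Int) : Decidable (Spec_stevilo_ovir vrstica out) := by unfold Spec_stevilo_ovir; infer_instance

-- ===== CLAIM (what is proved, stated in full; the proofs are below) =====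
def Claim_equal_stevilo_ovir : Prop := ∀ (vrstica : String), Dom_stevilo_ovir vrstica → Spec_stevilo_ovir vrstica (stevilo_ovir vrstica)

-- ===== LEMMAS AND PROOFS =====

/-- apply f to the head of a list, keep the tail -/
def pvMapHead (f : List Char → List Char) : List (List Char) → List (List Char)
  | [] => []
  | x :: xs => f x :: xs

/-- structural recursion computing split('.') -/
def pvSplit : List Char → List (List Char)
  | [] => [[]]
  | c :: rest => if c = '.' then [] :: pvSplit rest else pvMapHead (c :: ·) (pvSplit rest)

theorem pvSplit_ne_nil (l : List Char) : pvSplit l ≠ [] := by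
  cases l with
  | nil => simp [pvSplit]
  | cons c rest =>
    simp only [pvSplit]
    split
    · simp
    · cases h : pvSplit rest with
      | nil => exact absurd h (pvSplit_ne_nil rest)
      | cons x xs => simp [pvMapHead]

theorem pvGo_spec (fuel : Nat) (l cur : List Char) (acc : List (List Char))
    (h : l.length ≤ fuel) :
    PySem.Chars.splitOn.go ['.'] fuel l cur acc
      = acc.reverse ++ pvMapHead (cur.reverse ++ ·) (pvSplit l) := by
  induction fuel generalizing l cur acc with
  | zero =>
    have hl : l = [] := List.eq_nil_of_length_eq_zero (Nat.le_zero.mp h)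
    subst hl
    simp [PySem.Chars.splitOn.go, pvSplit, pvMapHead]
  | succ n ih =>
    cases l with
    | nil => simp [PySem.Chars.splitOn.go, pvSplit, pvMapHead]
    | cons c rest =>
      simp only [PySem.Chars.splitOn.go]
      by_cases hc : c = '.'
      · subst hc
        rw [if_pos (by simp [List.isPrefixOf])]
        simp only [List.length_singleton, List.drop_succ_cons, List.drop_zero]
        rw [ih rest [] (cur.reverse :: acc) (by simpa using Nat.le_of_succ_le_succ h)]
        cases h' : pvSplit rest
        · exact absurd h' (pvSplit_ne_nil rest)
        · simp [pvSplit, pvMapHead, h']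
      · rw [if_neg (by simp [List.isPrefixOf, Ne.symm hc])]
        rw [ih rest (c :: cur) acc (by simpa using Nat.le_of_succ_le_succ h)]
        simp only [pvSplit, if_neg hc, List.reverse_cons]
        cases h' : pvSplit rest with
        | nil => exact absurd h' (pvSplit_ne_nil rest)
        | cons x xs => simp [pvMapHead]

theorem pvSplitOn_eq (l : List Char) : PySem.Chars.splitOn l ['.'] = pvSplit l := by
  rw [PySem.Chars.splitOn, pvGo_spec _ _ _ _ (by omega)]
  cases h : pvSplit l with
  | nil => exact absurd h (pvSplit_ne_nil l)
  | cons x xs => simp [pvMapHead]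

theorem pvIsIn_singleton (c : Char) (s : List Char) :
    PySem.Chars.isIn [c] s = s.contains c := by
  have key : (PySem.Chars.find s [c] = -1) ↔ ¬ c ∈ s := by
    have h := PySem.Chars.findFrom_natCast_eq_neg_one_iff s [c] 0 (Nat.zero_le _)
    simpa [PySem.Chars.findFrom_zero, List.singleton_infix_iff] using h
  rw [PySem.Chars.isIn]
  by_cases hm : c ∈ s
  · have : ¬ PySem.Chars.find s [c] = -1 := fun he => (key.mp he) hm
    simp [this, hm]
  · simp [key.mpr hm, hm]

-- count of parts containing '#'
def pvCnt (parts : List (List Char)) : Int :=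
  ((parts.filter (fun part => PySem.Chars.isIn ['#'] part)).length : Int)

theorem pvCnt_cons (p : List Char) (ps : List (List Char)) :
    pvCnt (p :: ps) = (if p.contains '#' then 1 else 0) + pvCnt ps := by
  simp [pvCnt, List.filter_cons, pvIsIn_singleton]
  split_ifs <;> simp <;> omega

def pvF (st : Bool × Int) (c : Char) : Bool × Int :=
  if c == '#' && !st.1 then (true, st.2 + 1)
  else if c == '.' && st.1 then (false, st.2)
  else st

theorem pvMain (l : List Char) (b : Bool) (n : Int) :
    (l.foldl pvF (b, n)).2
    = n + (if b then pvCnt (pvSplit l).tail else pvCnt (pvSplit l)) := by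
  induction l generalizing b n with
  | nil => cases b <;> simp [pvSplit, pvCnt, pvIsIn_singleton]
  | cons c rest ih =>
    rw [List.foldl_cons]
    obtain ⟨x, xs, h'⟩ : ∃ x xs, pvSplit rest = x :: xs := by
      cases h : pvSplit rest with
      | nil => exact absurd h (pvSplit_ne_nil rest)
      | cons x xs => exact ⟨x, xs, rfl⟩
    by_cases hh : c = '#'
    · subst hh
      cases b with
      | false =>
        rw [show pvF (false, n) '#' = (true, n + 1) from by simp [pvF], ih]
        simp [pvSplit, h', pvMapHead, pvCnt_cons]
        omega
      | true =>
        rw [show pvF (true, n) '#' = (true, n) from by simp [pvF], ih]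
        simp [pvSplit, h', pvMapHead]
    · by_cases hd : c = '.'
      · subst hd
        cases b with
        | false =>
          rw [show pvF (false, n) '.' = (false, n) from by simp [pvF], ih]
          simp [pvSplit, pvCnt_cons]
        | true =>
          rw [show pvF (true, n) '.' = (false, n) from by simp [pvF], ih]
          simp [pvSplit]
      · cases b with
        | false =>
          rw [show pvF (false, n) c = (false, n) from by simp [pvF, hh], ih]
          simp [pvSplit, hd, h', pvMapHead, pvCnt_cons, Ne.symm hh]
        | true =>
          rw [show pvF (true, n) c = (true, n) from by simp [pvF, hd], ih]
          simp [pvSplit, hd, h', pvMapHead]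

-- ===== VERDICT (by name: the statement is the Claim_ definition above) =====
theorem stevilo_ovir_spec : Claim_equal_stevilo_ovir := by
  intro v _
  show stevilo_ovir v = stevilo_ovir_alt v
  have hA : stevilo_ovir v = (v.toList.foldl pvF (false, 0)).2 := by
    unfold stevilo_ovir
    simp only [PySem.Str.len_eq]
    exact congrArg Prod.snd (PySem.List.foldl_pyRange_zero_pyGetD' v.toList ' ' pvF (false, 0))
  rw [hA, pvMain]
  unfold stevilo_ovir_alt
  rw [show (".".toList : List Char) = ['.'] from rfl,
      show ("#".toList : List Char) = ['#'] from rfl,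
      pvSplitOn_eq]
  simp [pvCnt]
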